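-- pv_equiv track=rewrite | github.com/Robert-M-Lucas/LanguageMaker2 | Translator.py | text_in_to_split_text
-- ===== SOURCE A (Python) =====
-- from typing import List
--
-- PUNCTUATION = ".,?\"'[]{};:<>/\\-=+|`~@#$%^&*()\n! "
--
-- def text_in_to_split_text(text_in: str) -> (List[str], bool):
--     if len(text_in) == 0:
--         return []
--
--     split_text = [""]
--     i = 0
--     start_punctuation = text_in[0] in PUNCTUATION
--     punctuation = start_punctuation
--     for c in text_in:
--         if (c in PUNCTUATION and punctuation) or (c not in PUNCTUATION and not punctuation):
--             split_text[i] += c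
--         else:
--             punctuation = not punctuation
--             split_text.append(c)
--             i += 1
--
--     return split_text, start_punctuation
-- ===== SOURCE B (Python) =====
-- from typing import List
--
-- PUNCTUATION = ".,?\"'[]{};:<>/\\-=+|`~@#$%^&*()\n! "
--
--
-- def text_in_to_split_text(text_in: str) -> (List[str], bool):
--     if len(text_in) == 0:
--         return []
--     # Stage 1: class of every character.
--     classes = [c in PUNCTUATION for c in text_in]
--     # Stage 2: cut positions = every index where the class changes, plus both ends.
--     cuts = [0] + [i for i in range(1, len(text_in)) if classes[i] != classes[i - 1]] + [len(text_in)]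
--     # Stage 3: slice the text at the cut positions.
--     split_text = [text_in[a:b] for a, b in zip(cuts, cuts[1:])]
--     return split_text, classes[0]
-- ===== Notes on version B (the rewrite author's own statement) =====
-- stated objective: faster
-- what changed: Replaces A's one-pass state machine (current-run index plus a punctuation flag toggled on class changes, building run strings by repeated string +=) with three staged passes: compute the per-character class list, collect the cut positions where the class changes, then slice the text between consecutive cut positions.
-- outside the precondition, e.g. on text_in_to_split_text(''): A returns (), B returns ()
import Mathlib
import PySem

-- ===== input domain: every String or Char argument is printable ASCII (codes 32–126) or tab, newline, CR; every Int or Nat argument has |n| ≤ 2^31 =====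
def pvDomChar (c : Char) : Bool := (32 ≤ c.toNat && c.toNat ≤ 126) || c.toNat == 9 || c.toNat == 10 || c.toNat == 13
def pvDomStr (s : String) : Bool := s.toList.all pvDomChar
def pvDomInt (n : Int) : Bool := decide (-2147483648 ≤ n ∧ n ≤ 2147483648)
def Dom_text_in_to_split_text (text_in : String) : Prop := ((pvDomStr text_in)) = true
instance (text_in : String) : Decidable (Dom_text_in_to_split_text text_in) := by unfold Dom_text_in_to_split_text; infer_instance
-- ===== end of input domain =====

-- B replaces A's one-pass state machine (current-run index + punctuation flag toggled on class
-- changes, repeated string +=) with three staged passes: a class list, the list of cut positions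
-- where the class changes, then slices of the text between consecutive cuts; objective: faster (measured).

-- ===== PORT A =====
def pvPunct : List Char := ".,?\"'[]{};:<>/\\-=+|`~@#$%^&*()\n! ".toList

def isPunct (c : Char) : Bool := pvPunct.contains c

def stepA (s : List String × Int × Bool) (c : Char) : List String × Int × Bool :=
  let (split_text, i, punctuation) := s
  if (isPunct c && punctuation) || (!isPunct c && !punctuation) then
    (split_text.set i.toNat ((split_text.getD i.toNat "").push c), i, punctuation)
  else
    (split_text ++ [c.toString], i + 1, !punctuation)

def text_in_to_split_text (text_in : String) : List String × Bool :=
  match text_in.toList with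
  | [] => ([], false)   -- Python A returns a bare [] (not a pair) here; excluded by Pre_
  | c0 :: _ =>
    let start_punctuation := isPunct c0
    let st := text_in.toList.foldl stepA ([""], (0 : Int), start_punctuation)
    (st.1, start_punctuation)

-- ===== PORT B =====
-- classes[i] and classes[i - 1] of Source B, always in range there (i ∈ [1, n)); pyGetD is exact on it
def bcond (classes : List Bool) (i : Int) : Bool :=
  PySem.List.pyGetD classes i false != PySem.List.pyGetD classes (i - 1) false

def text_in_to_split_text_alt (text_in : String) : List String × Bool :=
  match text_in.toList with
  | [] => ([], false)   -- Python B returns a bare [] (not a pair) here; excluded by Pre_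
  | _ :: _ =>
    let l := text_in.toList
    let classes := l.map isPunct
    let cuts := (0 : Int) :: (PySem.List.pyRange 1 (l.length : Int) 1).filter (bcond classes)
                  ++ [(l.length : Int)]
    let split_text := (cuts.zip cuts.tail).map
        (fun ab => String.ofList (PySem.List.slice l (some ab.1) (some ab.2)))
    (split_text, classes.getD 0 false)

-- ===== PRECONDITION & SPEC =====
-- Pre_ excludes only the empty string, on which Python A returns a bare list [] instead of a
-- (list, bool) pair — a value outside the declared return type List String × Bool.
def Pre_text_in_to_split_text (text_in : String) : Prop := text_in ≠ ""
instance (text_in : String) : Decidable (Pre_text_in_to_split_text text_in) := by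
  unfold Pre_text_in_to_split_text; infer_instance

def pvWitness_text_in_to_split_text : String := "Hi, a!"

def Spec_text_in_to_split_text (text_in : String) (out : List String × Bool) : Prop := out = text_in_to_split_text_alt text_in
instance (text_in : String) (out : List String × Bool) : Decidable (Spec_text_in_to_split_text text_in out) := by unfold Spec_text_in_to_split_text; infer_instance

-- ===== CLAIM (what is proved, stated in full; the proofs are below) =====
def Claim_equal_text_in_to_split_text : Prop := ∀ (text_in : String), Dom_text_in_to_split_text text_in → Pre_text_in_to_split_text text_in → Spec_text_in_to_split_text text_in (text_in_to_split_text text_in)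

-- ===== LEMMAS AND PROOFS =====

-- maximal runs of same-class characters: the common description both ports are reduced to
def groupRuns : List Char → List (List Char)
  | [] => []
  | c :: cs =>
    (c :: cs.takeWhile (fun d => isPunct d == isPunct c)) ::
      groupRuns (cs.dropWhile (fun d => isPunct d == isPunct c))
termination_by l => l.length
decreasing_by
  simp only [List.length_cons]
  exact Nat.lt_succ_of_le (List.length_dropWhile_le _ _)

-- ===== A side: the fold equals the run decomposition =====

-- right-recursive description of A's loop: current run `cur`, current class `p`
def procA (cur : String) (p : Bool) : List Char → List String
  | [] => [cur]
  | c :: cs => if isPunct c == p then procA (cur.push c) p cs else cur :: procA c.toString (!p) cs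

theorem cond_eq (c : Char) (p : Bool) :
    ((isPunct c && p) || (!isPunct c && !p)) = (isPunct c == p) := by
  cases isPunct c <;> cases p <;> rfl

theorem foldA_eq (cs : List Char) :
    ∀ (acc : List String) (cur : String) (p : Bool),
      (List.foldl stepA (acc ++ [cur], (acc.length : Int), p) cs).1 = acc ++ procA cur p cs := by
  induction cs with
  | nil => intro acc cur p; simp [procA]
  | cons c cs ih =>
    intro acc cur p
    by_cases h : isPunct c == p
    · have hs : stepA (acc ++ [cur], (acc.length : Int), p) c
          = (acc ++ [cur.push c], (acc.length : Int), p) := by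
        simp [stepA, cond_eq, h]
      rw [List.foldl_cons, hs, ih acc (cur.push c) p]
      simp [procA, h]
    · have hs : stepA (acc ++ [cur], (acc.length : Int), p) c
          = ((acc ++ [cur]) ++ [c.toString], (((acc ++ [cur]).length : Nat) : Int), !p) := by
        simp [stepA, cond_eq, h]
      rw [List.foldl_cons, hs, ih (acc ++ [cur]) c.toString (!p)]
      simp [procA, h]

theorem ofList_cons (c : Char) (t : List Char) :
    String.ofList (c :: t) = c.toString ++ String.ofList t := by
  rw [← String.toList_inj]; simp

theorem append_ofList_cons (s : String) (c : Char) (t : List Char) :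
    s ++ String.ofList (c :: t) = s.push c ++ String.ofList t := by
  rw [← String.toList_inj]; simp

theorem append_ofList_nil (s : String) : s ++ String.ofList [] = s := by
  rw [← String.toList_inj]; simp

theorem procA_eq (cs : List Char) :
    ∀ (cur : String) (p : Bool),
      procA cur p cs =
        (cur ++ String.ofList (cs.takeWhile (fun d => isPunct d == p))) ::
          (groupRuns (cs.dropWhile (fun d => isPunct d == p))).map String.ofList := by
  induction cs with
  | nil => intro cur p; simp [procA, groupRuns]
  | cons c cs ih =>
    intro cur p
    by_cases h : isPunct c == p
    · have hp : isPunct c = p := by simpa using h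
      simp only [procA, List.takeWhile, List.dropWhile, hp, BEq.rfl, if_true]
      rw [ih (cur.push c) p, append_ofList_cons]
    · have hp : isPunct c = !p := by cases p <;> cases hc : isPunct c <;> simp_all
      have hb : ((!p) == p) = false := by cases p <;> rfl
      simp only [procA, List.takeWhile, List.dropWhile, hp, hb,
        Bool.false_eq_true, if_false, append_ofList_nil]
      rw [ih c.toString (!p), groupRuns]
      simp only [hp, List.map_cons, ofList_cons]

theorem push_empty_ofList (c : Char) (t : List Char) :
    ("".push c) ++ String.ofList t = String.ofList (c :: t) := by
  rw [← String.toList_inj]; simp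

-- ===== B side: cut positions + slices equal the run decomposition =====

def boundary (l : List Char) : List Int :=
  (PySem.List.pyRange 1 (l.length : Int) 1).filter (bcond (l.map isPunct))

def cutsOf (l : List Char) : List Int := 0 :: boundary l ++ [(l.length : Int)]

def slicePairs (l : List Char) (cs : List Int) : List (List Char) :=
  (cs.zip cs.tail).map (fun ab => PySem.List.slice l (some ab.1) (some ab.2))

theorem bcond_char (l : List Char) (i : Int) (h1 : 1 ≤ i) (h2 : i < (l.length : Int)) :
    bcond (l.map isPunct) i
      = (isPunct (l.getD i.toNat ' ') != isPunct (l.getD (i.toNat - 1) ' ')) := by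
  unfold bcond
  rw [PySem.List.pyGetD_eq_getElem _ _ (by omega) (by simpa using h2),
      PySem.List.pyGetD_eq_getElem _ _ (by omega) (by simp; omega)]
  have hi : (i - 1).toNat = i.toNat - 1 := by omega
  have ha : i.toNat < l.length := by omega
  have hb : i.toNat - 1 < l.length := by omega
  simp [hi, ha, hb]

theorem getD_mem (l : List Char) (n : Nat) (h : n < l.length) (d : Char) : l.getD n d ∈ l := by
  rw [List.getD_eq_getElem _ _ h]; exact List.getElem_mem h

theorem boundary_run_nil (r : List Char) (p : Bool)
    (hall : ∀ x ∈ r, isPunct x = p) : boundary r = [] := by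
  unfold boundary
  rw [List.filter_eq_nil_iff]
  intro i hi
  obtain ⟨h1, h2⟩ := PySem.List.mem_pyRange_one.mp hi
  rw [bcond_char r i h1 h2,
    hall _ (getD_mem _ _ (by omega) ' '), hall _ (getD_mem _ _ (by omega) ' ')]
  simp

theorem boundary_run_cons (r : List Char) (d : Char) (ds : List Char) (p : Bool) (hr : r ≠ [])
    (hall : ∀ x ∈ r, isPunct x = p) (hhd : isPunct d = !p) :
    boundary (r ++ d :: ds)
      = (r.length : Int) :: (boundary (d :: ds)).map (· + (r.length : Int)) := by
  have hk : 1 ≤ (r.length : Int) := by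
    have := List.length_pos_iff.mpr hr; omega
  have hlen : ((r ++ d :: ds).length : Int) = (r.length : Int) + ((d :: ds).length : Int) := by
    simp
  unfold boundary
  rw [hlen, PySem.List.pyRange_one_append 1 (r.length : Int) _ hk (by simp; omega),
      List.filter_append]
  -- first block: no change inside the run r
  have hfirst : (PySem.List.pyRange 1 (r.length : Int) 1).filter
      (bcond ((r ++ d :: ds).map isPunct)) = [] := by
    rw [List.filter_eq_nil_iff]
    intro i hi
    obtain ⟨h1, h2⟩ := PySem.List.mem_pyRange_one.mp hi
    rw [bcond_char _ i h1 (by simp; omega)]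
    have e1 : (r ++ d :: ds).getD i.toNat ' ' = r.getD i.toNat ' ' :=
      List.getD_append _ _ _ _ (by omega)
    have e2 : (r ++ d :: ds).getD (i.toNat - 1) ' ' = r.getD (i.toNat - 1) ' ' :=
      List.getD_append _ _ _ _ (by omega)
    rw [e1, e2, hall _ (getD_mem _ _ (by omega) _), hall _ (getD_mem _ _ (by omega) _)]
    simp
  rw [hfirst, List.nil_append]
  -- second block: shift of boundary (d :: ds), with the cut at r.length in front
  have hm : (((r.length : Int) + ((d :: ds).length : Int)) - (r.length : Int)).toNat
      = ds.length + 1 := by simp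
  rw [PySem.List.pyRange_one, hm, List.range_succ_eq_map, List.filter_map]
  have hzero : (bcond ((r ++ d :: ds).map isPunct) ∘ fun k : Nat => (r.length : Int) + ↑k) 0
      = true := by
    simp only [Function.comp]
    rw [Nat.cast_zero, add_zero,
        bcond_char _ _ (by omega) (by omega)]
    have e1 : (r ++ d :: ds).getD (r.length : Int).toNat ' ' = d := by
      rw [Int.toNat_natCast, List.getD_append_right _ _ _ _ (le_refl _)]
      simp
    have e2 : (r ++ d :: ds).getD ((r.length : Int).toNat - 1) ' '
        = r.getD (r.length - 1) ' ' := by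
      rw [Int.toNat_natCast]
      exact List.getD_append _ _ _ _ (by omega)
    rw [e1, e2, hhd, hall _ (getD_mem _ _ (by omega) _)]
    cases p <;> simp
  rw [List.filter_cons_of_pos hzero, List.filter_map]
  -- remaining indices: congruence with the boundary of the tail
  have hcong : (List.range ds.length).filter
        ((bcond ((r ++ d :: ds).map isPunct) ∘ fun k : Nat => (r.length : Int) + ↑k) ∘ Nat.succ)
      = (List.range ds.length).filter
        ((bcond ((d :: ds).map isPunct) ∘ fun k : Nat => (1 : Int) + ↑k)) := by
    apply List.filter_congr
    intro j hj
    have hjlt : j < ds.length := List.mem_range.mp hj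
    simp only [Function.comp]
    rw [bcond_char _ _ (by omega) (by push_cast; omega),
        bcond_char _ _ (by omega) (by omega)]
    have t1 : ((r.length : Int) + ↑(j.succ)).toNat = r.length + (j + 1) := by omega
    have t2 : ((1 : Int) + (j : Int)).toNat = j + 1 := by omega
    have e1 : (r ++ d :: ds).getD (r.length + (j + 1)) ' ' = (d :: ds).getD (j + 1) ' ' := by
      rw [List.getD_append_right _ _ _ _ (by omega)]; congr 1; omega
    have e2 : (r ++ d :: ds).getD (r.length + (j + 1) - 1) ' ' = (d :: ds).getD j ' ' := by
      rw [List.getD_append_right _ _ _ _ (by omega)]; congr 1; omega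
    rw [t1, t2, e1, e2]
    simp
  -- now rewrite the RHS into the same shape
  have hrhs : (PySem.List.pyRange 1 (((d :: ds).length : Nat) : Int) 1).filter
        (bcond ((d :: ds).map isPunct))
      = ((List.range ds.length).filter
          (bcond ((d :: ds).map isPunct) ∘ fun k : Nat => (1 : Int) + ↑k)).map
          (fun k : Nat => (1 : Int) + ↑k) := by
    rw [PySem.List.pyRange_one, List.filter_map]
    congr 1
    simp
  rw [hcong, hrhs]
  simp only [List.map_cons, List.map_map, Nat.cast_zero, add_zero]
  congr 1
  apply List.map_congr_left
  intro j hj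
  simp only [Function.comp]
  push_cast
  ring

theorem slicePairs_cons (l : List Char) (a b : Int) (T : List Int) :
    slicePairs l (a :: b :: T)
      = PySem.List.slice l (some a) (some b) :: slicePairs l (b :: T) := rfl

theorem cuts_shift (r : List Char) (d : Char) (ds : List Char) (p : Bool) (hr : r ≠ [])
    (hall : ∀ x ∈ r, isPunct x = p) (hhd : isPunct d = !p) :
    cutsOf (r ++ d :: ds) = 0 :: (cutsOf (d :: ds)).map (· + (r.length : Int)) := by
  unfold cutsOf
  rw [boundary_run_cons r d ds p hr hall hhd]
  simp only [List.map_cons, List.map_append, List.cons_append, List.map, zero_add,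
    List.length_append, List.length_cons, List.cons.injEq, List.append_cancel_left_eq]
  refine ⟨trivial, trivial, ?_, trivial⟩
  push_cast
  ring

theorem cutsOf_nonneg (l : List Char) : ∀ x ∈ cutsOf l, 0 ≤ x := by
  intro x hx
  unfold cutsOf at hx
  rcases List.mem_cons.mp hx with h | h
  · omega
  rcases List.mem_append.mp h with h | h
  · have := (PySem.List.mem_pyRange_one.mp (List.mem_of_mem_filter h)).1; omega
  · simp at h; omega

theorem slicePairs_shift (r rest : List Char) :
    ∀ (cs : List Int), (∀ x ∈ cs, 0 ≤ x) →
      slicePairs (r ++ rest) (cs.map (· + (r.length : Int))) = slicePairs rest cs := by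
  intro cs
  induction cs with
  | nil => intro _; rfl
  | cons a t ih =>
    intro hnn
    cases t with
    | nil => rfl
    | cons b t' =>
      have ha : 0 ≤ a := hnn a (by simp)
      have hb : 0 ≤ b := hnn b (by simp)
      have hstep : PySem.List.slice (r ++ rest) (some (a + (r.length : Int)))
          (some (b + (r.length : Int))) = PySem.List.slice rest (some a) (some b) := by
        rw [PySem.List.slice_toNat _ ha hb, PySem.List.slice_toNat _ (by omega) (by omega)]
        have t2 : (b + (r.length : Int)).toNat - (a + (r.length : Int)).toNat
            = b.toNat - a.toNat := by omega
        have t1 : (a + (r.length : Int)).toNat = a.toNat + r.length := by omega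
        rw [t2, t1, List.drop_append]
        have t3 : a.toNat + r.length - r.length = a.toNat := by omega
        rw [t3, List.drop_eq_nil_of_le (by omega), List.nil_append]
      have htail := ih (fun x hx => hnn x (List.mem_cons_of_mem _ hx))
      simp only [List.map_cons] at htail ⊢
      rw [slicePairs_cons, slicePairs_cons, hstep, htail]

theorem slicePairs_cutsOf (n : Nat) : ∀ (l : List Char), l.length ≤ n → l ≠ [] →
    slicePairs l (cutsOf l) = groupRuns l := by
  induction n with
  | zero =>
    intro l hl hne
    cases l with
    | nil => exact absurd rfl hne
    | cons a t => simp only [List.length_cons] at hl; omega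
  | succ n ih =>
    intro l hl hne
    cases hc : l with
    | nil => exact absurd hc hne
    | cons c cs =>
      subst hc
      have hsplit : c :: cs
          = (c :: cs.takeWhile (fun d => isPunct d == isPunct c))
            ++ cs.dropWhile (fun d => isPunct d == isPunct c) := by
        simp [List.takeWhile_append_dropWhile]
      have hallr : ∀ x ∈ c :: cs.takeWhile (fun d => isPunct d == isPunct c),
          isPunct x = isPunct c := by
        intro x hx
        rcases List.mem_cons.mp hx with h | h
        · rw [h]
        · simpa using List.mem_takeWhile_imp h
      have hgr : groupRuns (c :: cs)
          = (c :: cs.takeWhile (fun d => isPunct d == isPunct c))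
            :: groupRuns (cs.dropWhile (fun d => isPunct d == isPunct c)) := by
        rw [groupRuns]
      cases hrc : cs.dropWhile (fun d => isPunct d == isPunct c) with
      | nil =>
        have hlr : (c :: cs.takeWhile (fun d => isPunct d == isPunct c))
            ++ cs.dropWhile (fun d => isPunct d == isPunct c) = c :: cs := hsplit.symm
        have hb : boundary (c :: cs) = [] := by
          rw [hsplit, hrc, List.append_nil]
          exact boundary_run_nil _ (isPunct c) (fun x hx => hallr x hx)
        rw [hgr, hrc]
        unfold cutsOf slicePairs
        rw [hb]
        have hcs : cs.takeWhile (fun d => isPunct d == isPunct c) = cs := by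
          have h2 := hsplit
          rw [hrc, List.append_nil] at h2
          exact (List.cons_inj_right c).mp h2.symm
        simp only [List.singleton_append, List.zip_cons_cons, List.tail_cons,
          List.zip_nil_right, List.map_cons, List.map_nil, groupRuns]
        rw [PySem.List.slice_toNat _ (by omega) (by omega)]
        simp [hcs]
      | cons d ds =>
        have hne2 : cs.dropWhile (fun d => isPunct d == isPunct c) ≠ [] := by
          rw [hrc]; simp
        have hhd : isPunct d = !(isPunct c) := by
          have h := List.head_dropWhile_not (fun d => isPunct d == isPunct c) hne2
          simp only [hrc, List.head_cons] at h
          cases hdp : isPunct d <;> cases hcp : isPunct c <;> rw [hdp, hcp] at h <;>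
            simp at h ⊢
        have hrne : (c :: cs.takeWhile (fun d => isPunct d == isPunct c)) ≠ [] := by simp
        have hlen : (d :: ds).length ≤ n := by
          have h1 := List.length_dropWhile_le (fun d => isPunct d == isPunct c) cs
          rw [hrc] at h1
          simp only [List.length_cons] at hl h1 ⊢
          omega
        rw [hgr, hrc]
        conv_lhs => rw [hsplit, hrc]
        rw [cuts_shift _ d ds (isPunct c) hrne hallr hhd]
        obtain ⟨T, hT⟩ : ∃ T, cutsOf (d :: ds) = 0 :: T := ⟨_, rfl⟩
        have hshift := slicePairs_shift (c :: cs.takeWhile (fun e => isPunct e == isPunct c))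
          (d :: ds) (cutsOf (d :: ds)) (cutsOf_nonneg _)
        rw [hT, List.map_cons] at hshift
        rw [hT, List.map_cons, slicePairs_cons]
        have hfirst : PySem.List.slice
            ((c :: cs.takeWhile (fun e => isPunct e == isPunct c)) ++ d :: ds)
            (some 0) (some ((0 : Int) + ((c :: cs.takeWhile (fun e => isPunct e == isPunct c)).length : Int)))
            = c :: cs.takeWhile (fun e => isPunct e == isPunct c) := by
          rw [PySem.List.slice_toNat _ (by omega) (by omega)]
          have ht : ((0 : Int) + ((c :: cs.takeWhile (fun e => isPunct e == isPunct c)).length : Int)).toNat - (0 : Int).toNat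
              = (c :: cs.takeWhile (fun e => isPunct e == isPunct c)).length := by omega
          rw [ht]
          simp
        rw [hfirst, hshift, ← hT, ih (d :: ds) hlen (by simp)]

theorem slicePairs_map (l : List Char) (cs : List Int) :
    (cs.zip cs.tail).map (fun ab => String.ofList (PySem.List.slice l (some ab.1) (some ab.2)))
      = (slicePairs l cs).map String.ofList := by
  unfold slicePairs
  rw [List.map_map]
  rfl

-- ===== VERDICT (by name: the statement is the Claim_ definition above) =====
theorem text_in_to_split_text_spec : Claim_equal_text_in_to_split_text := by
  intro text_in _ hpre
  unfold Spec_text_in_to_split_text text_in_to_split_text text_in_to_split_text_alt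
  cases hl : text_in.toList with
  | nil =>
    exact absurd (String.toList_inj.mp (by simp [hl])) hpre
  | cons c0 cs =>
    simp only []
    -- A side: the fold is the run decomposition
    have hfold := foldA_eq (c0 :: cs) [] "" (isPunct c0)
    simp only [List.length_nil, Nat.cast_zero, List.nil_append] at hfold
    rw [hfold]
    have hstep : procA "" (isPunct c0) (c0 :: cs) = procA ("".push c0) (isPunct c0) cs := by
      simp [procA]
    rw [hstep, procA_eq]
    -- B side: the zipped slices are the run decomposition
    have hcuts : (0 : Int) :: (PySem.List.pyRange 1 (((c0 :: cs).length : Nat) : Int) 1).filter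
          (bcond ((c0 :: cs).map isPunct)) ++ [(((c0 :: cs).length : Nat) : Int)]
        = cutsOf (c0 :: cs) := rfl
    rw [hcuts, slicePairs_map,
      slicePairs_cutsOf (c0 :: cs).length (c0 :: cs) (le_refl _) (by simp)]
    rw [groupRuns]
    simp only [List.map_cons]
    rw [push_empty_ofList]
    rfl
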